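-- pv_equiv track=rewrite | github.com/baradlab/surface-morphometrics-gui | src/plugins/custom_vedo_cutter.py | _select_initial_scalar
-- ===== SOURCE A (Python) =====
-- def _select_initial_scalar(scalar_names):
--     """Select the best initial scalar to display."""
--     # Priority order for different property types
--     priority_arrays = [
--         'gauss_curvature', 'mean_curvature', 'min_curvature', 'max_curvature',
--         'shape_index_VV', 'curvedness_VV',
--         'area',
--         'orientation_class',
--         'kappa_1', 'kappa_2'
--     ]
--
--     # Check for priority arrays (case insensitive)
--     for priority in priority_arrays:
--         for name in scalar_names:
--             if priority.lower() in name.lower():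
--                 return name
--
--     # Fallback to first available array
--     if scalar_names:
--         return scalar_names[0]
--
--     return None
-- ===== SOURCE B (Python) =====
-- def _select_initial_scalar(scalar_names):
--     """Select the best initial scalar to display."""
--     priority_arrays = [
--         'gauss_curvature', 'mean_curvature', 'min_curvature', 'max_curvature',
--         'shape_index_VV', 'curvedness_VV',
--         'area',
--         'orientation_class',
--         'kappa_1', 'kappa_2'
--     ]
--     lowered = [p.lower() for p in priority_arrays]
--     no_match = len(lowered)
--
--     best_name = None
--     best_rank = no_match
--     for name in scalar_names:
--         low = name.lower()
--         rank = no_match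
--         for j, p in enumerate(lowered):
--             if p in low:
--                 rank = j
--                 break
--         if rank < best_rank:
--             best_rank = rank
--             best_name = name
--
--     if best_name is not None:
--         return best_name
--     return scalar_names[0] if scalar_names else None
-- ===== Notes on version B (the rewrite author's own statement) =====
-- stated objective: alternative
-- what changed: Flips the loop nesting: one pass over scalar_names computing each name's priority rank (index of first matching priority, with an early break), tracking the minimal (rank, encounter-order) name, instead of rescanning all names once per priority.
import Mathlib
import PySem

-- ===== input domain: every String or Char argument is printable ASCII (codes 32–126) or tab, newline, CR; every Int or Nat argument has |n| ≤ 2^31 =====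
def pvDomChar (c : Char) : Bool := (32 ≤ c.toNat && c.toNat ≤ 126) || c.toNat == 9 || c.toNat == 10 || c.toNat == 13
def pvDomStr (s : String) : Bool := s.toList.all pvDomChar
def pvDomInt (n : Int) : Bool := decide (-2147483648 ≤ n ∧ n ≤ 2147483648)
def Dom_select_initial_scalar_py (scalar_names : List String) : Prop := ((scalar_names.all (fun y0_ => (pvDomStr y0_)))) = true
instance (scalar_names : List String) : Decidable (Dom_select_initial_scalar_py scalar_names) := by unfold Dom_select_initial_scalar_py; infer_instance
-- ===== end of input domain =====

-- B flips the loop nesting (one pass over names with a computed priority rank instead of a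
-- rescan of names per priority); objective: alternative decomposition, same cost.

-- ===== PORT A =====
def pvPriorities : List String :=
  ["gauss_curvature", "mean_curvature", "min_curvature", "max_curvature",
   "shape_index_VV", "curvedness_VV",
   "area",
   "orientation_class",
   "kappa_1", "kappa_2"]

-- inner 'for name in scalar_names: if priority.lower() in name.lower(): return name'
def pvAFind (p : String) : List String → Option String
  | [] => none
  | n :: ns =>
    if PySem.Str.isIn (PySem.Str.lower p) (PySem.Str.lower n) then some n else pvAFind p ns

-- outer 'for priority in priority_arrays'
def pvALoop (names : List String) : List String → Option String
  | [] => none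
  | p :: ps =>
    match pvAFind p names with
    | some n => some n
    | none => pvALoop names ps

def select_initial_scalar_py (scalar_names : List String) : Option String :=
  match pvALoop scalar_names pvPriorities with
  | some n => some n
  | none =>
    match scalar_names with
    | [] => none
    | n :: _ => some n

-- ===== PORT B =====
-- lowered = [p.lower() for p in priority_arrays]
def pvLowered : List String := pvPriorities.map PySem.Str.lower

-- inner 'for j, p in enumerate(lowered): if p in low: rank = j; break' (default: no_match = len)
def pvRank (low : List String) (name : String) : Nat :=
  match low.findIdx? (fun p => PySem.Str.isIn p (PySem.Str.lower name)) with
  | some j => j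
  | none => low.length

-- body of 'for name in scalar_names' updating (best_name, best_rank)
def pvBStep (low : List String) (st : Option String × Nat) (name : String) : Option String × Nat :=
  let r := pvRank low name
  if r < st.2 then (some name, r) else st

def select_initial_scalar_py_alt (scalar_names : List String) : Option String :=
  let st := scalar_names.foldl (pvBStep pvLowered) (none, pvLowered.length)
  match st.1 with
  | some n => some n
  | none =>
    match scalar_names with
    | [] => none
    | n :: _ => some n

-- ===== PRECONDITION & SPEC =====
def Spec_select_initial_scalar_py (scalar_names : List String) (out : Option String) : Prop := out = select_initial_scalar_py_alt scalar_names
instance (scalar_names : List String) (out : Option String) : Decidable (Spec_select_initial_scalar_py scalar_names out) := by unfold Spec_select_initial_scalar_py; infer_instance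

-- ===== CLAIM (what is proved, stated in full; the proofs are below) =====
def Claim_equal_select_initial_scalar_py : Prop := ∀ (scalar_names : List String), Dom_select_initial_scalar_py scalar_names → Spec_select_initial_scalar_py scalar_names (select_initial_scalar_py scalar_names)

-- ===== LEMMAS AND PROOFS =====

-- rank against a cons: 0 on a match of the head, else one more than the rank against the tail
theorem pvRank_cons (q : String) (low : List String) (n : String) :
    pvRank (q :: low) n =
      if PySem.Str.isIn q (PySem.Str.lower n) then 0 else pvRank low n + 1 := by
  unfold pvRank
  rw [List.findIdx?_cons]
  by_cases h : PySem.Str.isIn q (PySem.Str.lower n) = true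
  · rw [if_pos h, if_pos h]
  · rw [if_neg h, if_neg h]
    cases low.findIdx? (fun p => PySem.Str.isIn p (PySem.Str.lower n)) with
    | some j => rfl
    | none => rfl

-- once best_rank is 0 the state is frozen
theorem pvFold_zero (low : List String) :
    ∀ (names : List String) (bn : Option String),
      names.foldl (pvBStep low) (bn, 0) = (bn, 0) := by
  intro names
  induction names with
  | nil => intro bn; rfl
  | cons n ns ih =>
    intro bn
    rw [List.foldl_cons]
    have hstep : pvBStep low (bn, 0) n = (bn, 0) := by
      simp only [pvBStep]
      rw [if_neg (Nat.not_lt_zero _)]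
    rw [hstep]
    exact ih bn

-- no name matches the head priority: the head only shifts every rank (and best_rank) by one
theorem pvFold_shift (p : String) (low' : List String) :
    ∀ (names : List String) (bn : Option String) (br : Nat),
      (∀ n ∈ names, ¬ PySem.Str.isIn (PySem.Str.lower p) (PySem.Str.lower n) = true) →
      names.foldl (pvBStep (PySem.Str.lower p :: low')) (bn, br + 1) =
        ((names.foldl (pvBStep low') (bn, br)).1,
         (names.foldl (pvBStep low') (bn, br)).2 + 1) := by
  intro names
  induction names with
  | nil => intro bn br _; rfl
  | cons n ns ih =>
    intro bn br h
    have hn : ¬ PySem.Str.isIn (PySem.Str.lower p) (PySem.Str.lower n) = true :=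
      h n (List.mem_cons_self ..)
    have hns : ∀ m ∈ ns, ¬ PySem.Str.isIn (PySem.Str.lower p) (PySem.Str.lower m) = true :=
      fun m hm => h m (List.mem_cons_of_mem _ hm)
    have hr : pvRank (PySem.Str.lower p :: low') n = pvRank low' n + 1 := by
      rw [pvRank_cons, if_neg hn]
    rw [List.foldl_cons, List.foldl_cons]
    by_cases hlt : pvRank low' n < br
    · have h1 : pvBStep (PySem.Str.lower p :: low') (bn, br + 1) n =
          (some n, pvRank low' n + 1) := by
        simp only [pvBStep]
        rw [hr, if_pos (Nat.succ_lt_succ hlt)]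
      have h2 : pvBStep low' (bn, br) n = (some n, pvRank low' n) := by
        simp only [pvBStep]
        rw [if_pos hlt]
      rw [h1, h2]
      exact ih (some n) (pvRank low' n) hns
    · have h1 : pvBStep (PySem.Str.lower p :: low') (bn, br + 1) n = (bn, br + 1) := by
        simp only [pvBStep]
        rw [hr, if_neg (fun c => hlt (Nat.lt_of_succ_lt_succ c))]
      have h2 : pvBStep low' (bn, br) n = (bn, br) := by
        simp only [pvBStep]
        rw [if_neg hlt]
      rw [h1, h2]
      exact ih bn br hns

-- some name matches the head priority: the one-pass fold returns the first such name
theorem pvFold_hit (p : String) (low' : List String) :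
    ∀ (names : List String) (n0 : String) (bn : Option String) (br : Nat),
      1 ≤ br → pvAFind p names = some n0 →
      (names.foldl (pvBStep (PySem.Str.lower p :: low')) (bn, br)).1 = some n0 := by
  intro names
  induction names with
  | nil => intro n0 bn br _ h; exact absurd h (by simp [pvAFind])
  | cons n ns ih =>
    intro n0 bn br hbr h
    have hdef : pvAFind p (n :: ns) =
        if PySem.Str.isIn (PySem.Str.lower p) (PySem.Str.lower n) then some n
        else pvAFind p ns := rfl
    rw [List.foldl_cons]
    by_cases hn : PySem.Str.isIn (PySem.Str.lower p) (PySem.Str.lower n) = true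
    · have h'' : some n = some n0 := by
        rw [hdef, if_pos hn] at h
        exact h
      have hstep : pvBStep (PySem.Str.lower p :: low') (bn, br) n = (some n, 0) := by
        simp only [pvBStep]
        rw [pvRank_cons, if_pos hn, if_pos (Nat.lt_of_lt_of_le Nat.zero_lt_one hbr)]
      rw [hstep, pvFold_zero]
      exact h''
    · have h' : pvAFind p ns = some n0 := by
        rw [hdef, if_neg hn] at h
        exact h
      have hr : pvRank (PySem.Str.lower p :: low') n = pvRank low' n + 1 := by
        rw [pvRank_cons, if_neg hn]
      by_cases hlt : pvRank low' n + 1 < br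
      · have hstep : pvBStep (PySem.Str.lower p :: low') (bn, br) n =
            (some n, pvRank low' n + 1) := by
          simp only [pvBStep]
          rw [hr, if_pos hlt]
        rw [hstep]
        exact ih n0 (some n) (pvRank low' n + 1) (Nat.succ_le_succ (Nat.zero_le _)) h'
      · have hstep : pvBStep (PySem.Str.lower p :: low') (bn, br) n = (bn, br) := by
          simp only [pvBStep]
          rw [hr, if_neg hlt]
        rw [hstep]
        exact ih n0 bn br hbr h'

-- pvAFind misses exactly when no name matches
theorem pvAFind_none (p : String) :
    ∀ (names : List String), pvAFind p names = none →
      ∀ n ∈ names, ¬ PySem.Str.isIn (PySem.Str.lower p) (PySem.Str.lower n) = true := by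
  intro names
  induction names with
  | nil => intro _ n hn; cases hn
  | cons m ms ih =>
    intro h n hn
    have hdef : pvAFind p (m :: ms) =
        if PySem.Str.isIn (PySem.Str.lower p) (PySem.Str.lower m) then some m
        else pvAFind p ms := rfl
    by_cases hm : PySem.Str.isIn (PySem.Str.lower p) (PySem.Str.lower m) = true
    · rw [hdef, if_pos hm] at h
      exact absurd h (by simp)
    · have h' : pvAFind p ms = none := by
        rw [hdef, if_neg hm] at h
        exact h
      cases hn with
      | head => exact hm
      | tail _ hn => exact ih h' n hn

-- main correspondence: priorities-outer repeated scan = one pass with ranks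
theorem pvMain :
    ∀ (ps : List String) (names : List String),
      pvALoop names ps =
        (names.foldl (pvBStep (ps.map PySem.Str.lower)) (none, ps.length)).1 := by
  intro ps
  induction ps with
  | nil =>
    intro names
    simp only [pvALoop, List.map_nil, List.length_nil]
    rw [pvFold_zero]
  | cons p ps' ih =>
    intro names
    simp only [pvALoop, List.map_cons, List.length_cons]
    cases hf : pvAFind p names with
    | some n0 =>
      rw [pvFold_hit p (ps'.map PySem.Str.lower) names n0 none (ps'.length + 1)
        (Nat.succ_le_succ (Nat.zero_le _)) hf]
    | none =>
      rw [pvFold_shift p (ps'.map PySem.Str.lower) names none ps'.length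
        (pvAFind_none p names hf)]
      exact ih names

-- ===== VERDICT (by name: the statement is the Claim_ definition above) =====
theorem select_initial_scalar_py_spec : Claim_equal_select_initial_scalar_py := by
  intro names _
  unfold Spec_select_initial_scalar_py select_initial_scalar_py select_initial_scalar_py_alt
  rw [pvMain pvPriorities names]
  simp only [pvLowered, List.length_map]
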